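-- pv_equiv track=rewrite | github.com/generalmat82/game-picker | game picker/text based.py | delbyte1
-- ===== SOURCE A (Python) =====
-- def delbyte1(name):
--     nama=""
--     l = False
--     for i in name:
--         if l == False:
--             l = True
--             continue
--         nama=nama+i
--     return nama
-- ===== SOURCE B (Python) =====
-- def delbyte1(name):
--     return name[1:]
-- ===== Notes on version B (the rewrite author's own statement) =====
-- stated objective: idiomatic
-- what changed: Replaced the flag-guarded character loop that rebuilds the string by repeated concatenation with the closed-form slice name[1:].
import Mathlib
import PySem

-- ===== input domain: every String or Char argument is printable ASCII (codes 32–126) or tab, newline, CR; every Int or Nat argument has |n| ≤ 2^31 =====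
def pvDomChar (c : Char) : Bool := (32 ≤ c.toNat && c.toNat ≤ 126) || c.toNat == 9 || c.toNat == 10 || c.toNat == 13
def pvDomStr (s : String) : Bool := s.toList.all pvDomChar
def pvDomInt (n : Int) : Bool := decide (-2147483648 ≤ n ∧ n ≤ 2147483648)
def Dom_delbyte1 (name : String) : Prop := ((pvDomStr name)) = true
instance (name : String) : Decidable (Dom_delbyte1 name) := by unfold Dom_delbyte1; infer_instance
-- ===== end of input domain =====

-- B replaces the skip-first-char accumulating loop with the closed-form slice name[1:] (idiomatic).

-- ===== PORT A =====
-- literal transliteration: fold over the characters with accumulator (nama, l);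
-- the flag l skips the first character, every later one is appended.
def delbyte1 (name : String) : String :=
  let st := name.toList.foldl
    (fun (st : List Char × Bool) i =>
      if st.2 == false then (st.1, true) else (st.1 ++ [i], st.2))
    ([], false)
  String.ofList st.1

-- ===== PORT B =====
def delbyte1_alt (name : String) : String :=
  String.ofList (PySem.List.slice name.toList (some 1) none)

-- ===== PRECONDITION & SPEC =====
def Spec_delbyte1 (name : String) (out : String) : Prop := out = delbyte1_alt name
instance (name : String) (out : String) : Decidable (Spec_delbyte1 name out) := by unfold Spec_delbyte1; infer_instance

-- ===== CLAIM (what is proved, stated in full; the proofs are below) =====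
def Claim_equal_delbyte1 : Prop := ∀ (name : String), Dom_delbyte1 name → Spec_delbyte1 name (delbyte1 name)

-- ===== LEMMAS AND PROOFS =====
-- once the flag is true, the loop appends every remaining character
lemma delbyte1_loop_true (cs : List Char) (acc : List Char) :
    cs.foldl
      (fun (st : List Char × Bool) i =>
        if st.2 == false then (st.1, true) else (st.1 ++ [i], st.2))
      (acc, true) = (acc ++ cs, true) := by
  induction cs generalizing acc with
  | nil => simp
  | cons c cs ih => simpa using ih (acc ++ [c])

-- ===== VERDICT (by name: the statement is the Claim_ definition above) =====
theorem delbyte1_spec : Claim_equal_delbyte1 := by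
  intro name _
  unfold Spec_delbyte1 delbyte1 delbyte1_alt
  rw [PySem.List.slice_from_one]
  cases h : name.toList with
  | nil => simp
  | cons c cs =>
    show String.ofList (List.foldl
      (fun (st : List Char × Bool) i =>
        if st.2 == false then (st.1, true) else (st.1 ++ [i], st.2)) ([], false) (c :: cs)).1
      = String.ofList (c :: cs).tail
    rw [List.foldl_cons, if_pos (by decide), delbyte1_loop_true cs []]
    simp
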